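-- pv_equiv track=rewrite | github.com/Mister-Neko/python-works | gen_rand_quiz.py | state_cap_question
-- ===== SOURCE A (Python) =====
-- def state_cap_question(states, capitals):
--   s = states
--   c = capitals
--   temp_q = {}
--
--   for i in range(len(c)):
--     if i % 5 == 0:
--       temp_q[f'What is the capital of {states[i]}?'] = c[states[i]]
--     elif i % 5 == 1:
--       temp_q[f'{states[i]}\'s capital is?'] = c[states[i]]
--     elif i % 5 == 2:
--       temp_q[f'Name the capital of {states[i]}'] = c[states[i]]
--     elif i % 5 == 3:
--       temp_q[f'Which is the capital of {states[i]}?'] = c[states[i]]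
--     else:
--       temp_q[f'Choose the capital name of the state of {states[i]}?'] = c[states[i]]
--
--   return temp_q
-- ===== SOURCE B (Python) =====
-- TEMPLATES = [("What is the capital of ", "?"),
--              ("", "'s capital is?"),
--              ("Name the capital of ", ""),
--              ("Which is the capital of ", "?"),
--              ("Choose the capital name of the state of ", "?")]
--
--
-- def state_cap_question(states, capitals):
--     # Consume the states in blocks of five, zipping each block with the fixed
--     # template list (zip truncates the short final block): no indices, no
--     # modulo arithmetic, no branch dispatch.
--     quiz = {}
--     pending = states[:len(capitals)]
--     while pending:
--         for (pre, suf), s in zip(TEMPLATES, pending):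
--             quiz[pre + s + suf] = capitals[s]
--         pending = pending[5:]
--     return quiz
-- ===== Notes on version B (the rewrite author's own statement) =====
-- stated objective: alternative
-- what changed: Instead of A's index loop with a five-way i%5 if/elif dispatch, B consumes the states in blocks of five, zipping each block with the fixed template list (zip truncates the short final block), so there are no indices, no modulo and no branching.
import Mathlib
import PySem

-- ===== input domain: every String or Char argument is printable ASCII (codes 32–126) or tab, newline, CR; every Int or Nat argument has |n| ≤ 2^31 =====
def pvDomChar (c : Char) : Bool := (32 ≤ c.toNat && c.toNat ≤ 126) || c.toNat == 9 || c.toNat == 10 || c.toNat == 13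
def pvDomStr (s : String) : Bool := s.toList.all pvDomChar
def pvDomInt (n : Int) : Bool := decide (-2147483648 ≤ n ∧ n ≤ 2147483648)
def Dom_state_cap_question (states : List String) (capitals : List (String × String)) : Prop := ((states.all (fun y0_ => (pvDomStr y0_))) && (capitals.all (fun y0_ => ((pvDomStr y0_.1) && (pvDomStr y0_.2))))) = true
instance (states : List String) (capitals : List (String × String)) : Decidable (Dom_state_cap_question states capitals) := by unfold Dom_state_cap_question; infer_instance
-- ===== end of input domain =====

-- B consumes the states in blocks of five, zipping each block with the fixed template list,
-- instead of A's index loop with a five-way modulo dispatch — an alternative decomposition, same cost.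

-- ===== PORT A =====
def state_cap_question (states : List String) (capitals : List (String × String)) : List (String × String) :=
  ((PySem.List.pyRange 0 (capitals.length : Int) 1).foldl
    (fun d i =>
      let st := (PySem.List.pyGet? states i).getD ""      -- states[i]; Pre_ keeps i in range
      let v := (PySem.Dict.mk capitals).getD st ""        -- c[states[i]]; Pre_ keeps the key present
      if PySem.Int.mod i 5 == 0 then
        PySem.Dict.insert d ("What is the capital of " ++ st ++ "?") v
      else if PySem.Int.mod i 5 == 1 then
        PySem.Dict.insert d (st ++ "'s capital is?") v
      else if PySem.Int.mod i 5 == 2 then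
        PySem.Dict.insert d ("Name the capital of " ++ st) v
      else if PySem.Int.mod i 5 == 3 then
        PySem.Dict.insert d ("Which is the capital of " ++ st ++ "?") v
      else
        PySem.Dict.insert d ("Choose the capital name of the state of " ++ st ++ "?") v)
    PySem.Dict.empty).items

-- ===== PORT B =====
def pvTemplates : List (String × String) :=
  [("What is the capital of ", "?"),
   ("", "'s capital is?"),
   ("Name the capital of ", ""),
   ("Which is the capital of ", "?"),
   ("Choose the capital name of the state of ", "?")]

-- the 'while pending:' loop of Source B: one block of five (zip truncates), then the rest
def pvAsk (caps : PySem.Dict String String) (quiz : PySem.Dict String String) :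
    List String → PySem.Dict String String
  | [] => quiz
  | s :: rest =>
    let quiz' := ((pvTemplates.zip (s :: rest)).foldl
      (fun d p => PySem.Dict.insert d (p.1.1 ++ p.2 ++ p.1.2) (caps.getD p.2 "")) quiz)
    pvAsk caps quiz' ((s :: rest).drop 5)
termination_by pending => pending.length
decreasing_by simp

def state_cap_question_alt (states : List String) (capitals : List (String × String)) : List (String × String) :=
  (pvAsk (PySem.Dict.mk capitals) PySem.Dict.empty
    (PySem.List.slice states none (some (capitals.length : Int)))).items

-- ===== PRECONDITION & SPEC =====
-- Pre_ excludes exactly the inputs on which the Python A raises: an IndexError when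
-- len(capitals) > len(states), or a KeyError when some looked-up state is not a key of capitals.
def Pre_state_cap_question (states : List String) (capitals : List (String × String)) : Prop :=
  capitals.length ≤ states.length ∧
  ∀ s ∈ states.take capitals.length, (PySem.Dict.mk capitals).contains s = true
instance (states : List String) (capitals : List (String × String)) : Decidable (Pre_state_cap_question states capitals) := by unfold Pre_state_cap_question; infer_instance

def pvWitness_state_cap_question : List String × (List (String × String)) :=
  (["Ohio", "Texas"], [("Ohio", "Columbus"), ("Texas", "Austin")])

def Spec_state_cap_question (states : List String) (capitals : List (String × String)) (out : List (String × String)) : Prop := out = state_cap_question_alt states capitals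
instance (states : List String) (capitals : List (String × String)) (out : List (String × String)) : Decidable (Spec_state_cap_question states capitals out) := by unfold Spec_state_cap_question; infer_instance

-- ===== CLAIM (what is proved, stated in full; the proofs are below) =====
def Claim_equal_state_cap_question : Prop := ∀ (states : List String) (capitals : List (String × String)), Dom_state_cap_question states capitals → Pre_state_cap_question states capitals → Spec_state_cap_question states capitals (state_cap_question states capitals)

-- ===== LEMMAS AND PROOFS =====

-- A's loop body as a function of (index, state), used only in the proofs
def pvAIns (caps : PySem.Dict String String) (d : PySem.Dict String String) (i : Int) (st : String) :
    PySem.Dict String String :=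
  let v := caps.getD st ""
  if PySem.Int.mod i 5 == 0 then
    PySem.Dict.insert d ("What is the capital of " ++ st ++ "?") v
  else if PySem.Int.mod i 5 == 1 then
    PySem.Dict.insert d (st ++ "'s capital is?") v
  else if PySem.Int.mod i 5 == 2 then
    PySem.Dict.insert d ("Name the capital of " ++ st) v
  else if PySem.Int.mod i 5 == 3 then
    PySem.Dict.insert d ("Which is the capital of " ++ st ++ "?") v
  else
    PySem.Dict.insert d ("Choose the capital name of the state of " ++ st ++ "?") v

-- A's dict equals the fold of pvAIns over the enumerated prefix of states
lemma pvA_enum (states : List String) (capitals : List (String × String))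
    (hlen : capitals.length ≤ states.length) :
    state_cap_question states capitals =
    ((PySem.List.enumerate (states.take capitals.length) 0).foldl
      (fun d p => pvAIns (PySem.Dict.mk capitals) d p.1 p.2) PySem.Dict.empty).items := by
  unfold state_cap_question
  congr 1
  rw [PySem.List.enumerate_eq_map_pyRange _ "", List.foldl_map]
  have htake : PySem.List.len (List.take capitals.length states) = (capitals.length : Int) := by
    simp [PySem.List.len, List.length_take, Nat.min_eq_left hlen]
  rw [htake]
  apply PySem.List.foldl_congr_mem
  intro acc i hi
  rw [PySem.List.mem_pyRange_one] at hi
  obtain ⟨h0, h1⟩ := hi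
  have hlt : i < (states.length : Int) := lt_of_lt_of_le h1 (by exact_mod_cast hlen)
  have hget : PySem.List.pyGet? states i = some states[i.toNat] :=
    PySem.List.pyGet?_eq_some_getElem states h0 hlt
  have hltT : i < ((List.take capitals.length states).length : Int) := by
    simpa [List.length_take, Nat.min_eq_left hlen] using h1
  have hgetB : PySem.List.pyGetD (List.take capitals.length states) i "" = states[i.toNat] := by
    rw [PySem.List.pyGetD_eq_getElem _ _ h0 hltT]
    exact List.getElem_take
  simp only [hget, hgetB, Option.getD_some, pvAIns]

-- B's chunked loop equals the same fold (start index a multiple of 5)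
lemma pvB_chunks (caps : PySem.Dict String String) (pending : List String) (k : Nat)
    (quiz : PySem.Dict String String) :
    (PySem.List.enumerate pending (5 * (k : Int))).foldl
      (fun d p => pvAIns caps d p.1 p.2) quiz = pvAsk caps quiz pending := by
  induction hL : pending.length using Nat.strong_induction_on generalizing pending k quiz with
  | _ n ih =>
  have mc0 : PySem.Int.mod (5 * (k : Int)) 5 = 0 := by
    simp [PySem.Int.mod, Int.fmod_eq_emod]
  have mc1 : PySem.Int.mod (5 * (k : Int) + 1) 5 = 1 := by
    simp [PySem.Int.mod, Int.fmod_eq_emod]; try omega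
  have mc2 : PySem.Int.mod (5 * (k : Int) + 1 + 1) 5 = 2 := by
    simp [PySem.Int.mod, Int.fmod_eq_emod]; try omega
  have mc3 : PySem.Int.mod (5 * (k : Int) + 1 + 1 + 1) 5 = 3 := by
    simp [PySem.Int.mod, Int.fmod_eq_emod]; try omega
  have mc4 : PySem.Int.mod (5 * (k : Int) + 1 + 1 + 1 + 1) 5 = 4 := by
    simp [PySem.Int.mod, Int.fmod_eq_emod]; try omega
  match pending with
  | [] => simp [PySem.List.enumerate_nil, pvAsk]
  | [a] =>
    simp only [PySem.List.enumerate_cons, PySem.List.enumerate_nil, List.foldl_cons,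
      List.foldl_nil, pvAIns, mc0]
    simp [pvAsk, pvTemplates]
  | [a, b] =>
    simp only [PySem.List.enumerate_cons, PySem.List.enumerate_nil, List.foldl_cons,
      List.foldl_nil, pvAIns, mc0, mc1]
    simp [pvAsk, pvTemplates]
  | [a, b, c] =>
    simp only [PySem.List.enumerate_cons, PySem.List.enumerate_nil, List.foldl_cons,
      List.foldl_nil, pvAIns, mc0, mc1, mc2]
    simp [pvAsk, pvTemplates]
  | [a, b, c, d] =>
    simp only [PySem.List.enumerate_cons, PySem.List.enumerate_nil, List.foldl_cons,
      List.foldl_nil, pvAIns, mc0, mc1, mc2, mc3]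
    simp [pvAsk, pvTemplates]
  | a :: b :: c :: d :: e :: rest =>
    have hstart : 5 * (k : Int) + 1 + 1 + 1 + 1 + 1 = 5 * ((k + 1 : Nat) : Int) := by
      push_cast; ring
    simp only [PySem.List.enumerate_cons, List.foldl_cons, pvAIns, mc0, mc1, mc2, mc3, mc4, hstart]
    simp only [beq_iff_eq, Int.reduceEq, reduceIte]
    conv_rhs => rw [pvAsk]
    simp only [pvTemplates, List.zip, List.zipWith, List.drop]
    have hrec := fun q => ih rest.length (by simp at hL; omega) rest (k + 1) q rfl
    simp only [pvAIns, beq_iff_eq] at hrec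
    rw [hrec]
    congr 1
    simp [List.foldl]

-- ===== VERDICT (by name: the statement is the Claim_ definition above) =====
theorem state_cap_question_spec : Claim_equal_state_cap_question := by
  intro states capitals _ hpre
  obtain ⟨hlen, -⟩ := hpre
  unfold Spec_state_cap_question state_cap_question_alt
  rw [pvA_enum states capitals hlen, PySem.List.slice_to_natCast]
  congr 1
  have := pvB_chunks (PySem.Dict.mk capitals) (states.take capitals.length) 0 PySem.Dict.empty
  simpa using this
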